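/- GENERATED by farm/mkstatement.py from design/units.tsv (unit `compute_twiddle_factors`) and the Specs of Vorbis/Spec/*.lean — do not edit.
   THE STATEMENT of the proof unit `compute_twiddle_factors`: the function `compute_twiddle_factors` (125 instructions) satisfies its contract,
   given the contracts of its callees. What the names mean: Vorbis/Spec/Basic.lean. The theorem to prove:
   `theorem compute_twiddle_factors_ok : Vorbis.Spec.compute_twiddle_factors.Statement`. -/
import Vorbis.Spec.Libm
import Vorbis.Spec.Mdct
namespace Vorbis.Spec.compute_twiddle_factors
open X86 X86.User Asan

/-- The statement of unit `compute_twiddle_factors`. -/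
def Statement : Prop :=
  ∀ (Lay : Layout) (_hLay : Lay.hi = 0x1000000) (μ : Microarch) (_hμ : UserX.MicroOK μ) (u₀ : State)
    (_hcode : HasCodeNat Lay u₀ Vorbis.L.compute_twiddle_factors.entry Vorbis.Code.code_compute_twiddle_factors.nat Vorbis.L.compute_twiddle_factors.size)
    (_h_cos : ∀ (others : List Obj) (frames : List (Nat × FrameLayout)), Calls Lay μ Vorbis.WayInv (Vorbis.conv u₀) Vorbis.L.cos.entry (Vorbis.Spec.cos.spec others frames))
    (_h_asan_store4_noabort : Asan.SmallCheck Lay μ Vorbis.WayInv (Vorbis.CodeOK u₀) [.rax, .rcx, .rdx] 4 Vorbis.L.__asan_store4_noabort.entry)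
    (_h_sin : ∀ (others : List Obj) (frames : List (Nat × FrameLayout)), Calls Lay μ Vorbis.WayInv (Vorbis.conv u₀) Vorbis.L.sin.entry (Vorbis.Spec.sin.spec others frames)),
    ∀ (others : List Obj) (frames : List (Nat × FrameLayout)), Calls Lay μ Vorbis.WayInv (Vorbis.conv u₀) Vorbis.L.compute_twiddle_factors.entry (Vorbis.Spec.compute_twiddle_factors.spec others frames)

end Vorbis.Spec.compute_twiddle_factors
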